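-- pv_equiv track=rewrite | github.com/aktoak/NLP_keren | code/preprocessing_2.py | word_short_shape
-- ===== SOURCE A (Python) =====
-- def word_shape(word: str) -> str:
--     shape = ""
--     for c in word:
--         if c.isupper(): shape += "X"
--         elif c.islower(): shape += "x"
--         elif c.isdigit(): shape += "d"
--         else: shape += c
--     return shape
--
-- def word_short_shape(word: str) -> str:
--     long_shape = word_shape(word)
--     if not long_shape:
--         return ""
--     short_shape = long_shape[0]
--     for char in long_shape[1:]:
--         if char != short_shape[-1]:
--             short_shape += char
--     return short_shape
-- ===== SOURCE B (Python) =====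
-- def word_short_shape(word: str) -> str:
--     out = []
--     prev = None
--     for c in word:
--         sym = "X" if c.isupper() else "x" if c.islower() else "d" if c.isdigit() else c
--         if sym != prev:
--             out.append(sym)
--             prev = sym
--     return "".join(out)
-- ===== Notes on version B (the rewrite author's own statement) =====
-- stated objective: simpler
-- what changed: Replaced A's two-pass structure (build the full per-character shape string, then collapse repeated symbols in a second loop) with a single loop that computes each character's shape symbol inline and appends it to a list only when it differs from the previous symbol, never materialising the intermediate full-shape string.
import Mathlib
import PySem

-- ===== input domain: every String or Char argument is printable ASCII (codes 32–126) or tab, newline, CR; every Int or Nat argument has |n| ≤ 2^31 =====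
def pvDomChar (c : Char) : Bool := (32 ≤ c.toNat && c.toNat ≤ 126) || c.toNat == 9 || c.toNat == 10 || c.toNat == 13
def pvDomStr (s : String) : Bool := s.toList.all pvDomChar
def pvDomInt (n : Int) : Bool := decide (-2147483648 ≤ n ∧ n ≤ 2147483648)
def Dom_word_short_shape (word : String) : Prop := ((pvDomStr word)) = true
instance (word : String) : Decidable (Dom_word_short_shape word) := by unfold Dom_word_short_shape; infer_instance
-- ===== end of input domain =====

-- B fuses A's two passes (build full shape, then collapse runs) into one loop that
-- computes each character's shape symbol inline and appends it only when it differs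
-- from the previous symbol (objective: simpler, no intermediate full-shape string).

-- ===== PORT A =====
-- word_shape: for c in word, append "X"/"x"/"d"/c to shape
def pvWordShapeLoop (shape : List Char) : List Char → List Char
  | [] => shape
  | c :: cs =>
    if PySem.Chars.isupper c then pvWordShapeLoop (shape ++ ['X']) cs
    else if PySem.Chars.islower c then pvWordShapeLoop (shape ++ ['x']) cs
    else if PySem.Chars.isdigit c then pvWordShapeLoop (shape ++ ['d']) cs
    else pvWordShapeLoop (shape ++ [c]) cs

-- for char in long_shape[1:]: if char != short_shape[-1]: short_shape += char
def pvCollapseLoop (short : List Char) : List Char → List Char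
  | [] => short
  | c :: cs =>
    if c ≠ short.getLast! then pvCollapseLoop (short ++ [c]) cs
    else pvCollapseLoop short cs

def word_short_shape (word : String) : String :=
  let long_shape := pvWordShapeLoop [] word.toList
  match long_shape with
  | [] => ""
  | h :: t => String.mk (pvCollapseLoop [h] t)

-- ===== PORT B =====
-- single pass: prev symbol + output accumulator
def pvAltLoop (prev : Option Char) (out : List Char) : List Char → List Char
  | [] => out
  | c :: cs =>
    let sym : Char :=
      if PySem.Chars.isupper c then 'X'
      else if PySem.Chars.islower c then 'x'
      else if PySem.Chars.isdigit c then 'd'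
      else c
    if some sym ≠ prev then pvAltLoop (some sym) (out ++ [sym]) cs
    else pvAltLoop prev out cs

def word_short_shape_alt (word : String) : String :=
  String.mk (pvAltLoop none [] word.toList)

-- ===== PRECONDITION & SPEC =====
def Spec_word_short_shape (word : String) (out : String) : Prop := out = word_short_shape_alt word
instance (word : String) (out : String) : Decidable (Spec_word_short_shape word out) := by unfold Spec_word_short_shape; infer_instance

-- ===== CLAIM (what is proved, stated in full; the proofs are below) =====
def Claim_equal_word_short_shape : Prop := ∀ (word : String), Dom_word_short_shape word → Spec_word_short_shape word (word_short_shape word)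

-- ===== LEMMAS AND PROOFS =====

theorem pvGetLast!_concat (xs : List Char) (c : Char) : (xs ++ [c]).getLast! = c := by
  cases xs <;> simp [List.getLast!]

def pvSym (c : Char) : Char :=
  if PySem.Chars.isupper c then 'X'
  else if PySem.Chars.islower c then 'x'
  else if PySem.Chars.isdigit c then 'd'
  else c

theorem pvWordShapeLoop_eq (l : List Char) : ∀ shape,
    pvWordShapeLoop shape l = shape ++ l.map pvSym := by
  induction l with
  | nil => intro shape; simp [pvWordShapeLoop]
  | cons c cs ih =>
    intro shape
    simp only [pvWordShapeLoop, pvSym, List.map_cons]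
    split_ifs <;> simp [ih]

theorem pvAltLoop_sym (prev : Option Char) (out : List Char) (l : List Char) :
    pvAltLoop prev out l =
      match l with
      | [] => out
      | c :: cs =>
        if some (pvSym c) ≠ prev then pvAltLoop (some (pvSym c)) (out ++ [pvSym c]) cs
        else pvAltLoop prev out cs := by
  cases l <;> rfl

theorem pvCollapse_eq_alt (l : List Char) : ∀ (acc : List Char) (p : Char),
    acc.getLast! = p →
    pvCollapseLoop acc (l.map pvSym) = pvAltLoop (some p) acc l := by
  induction l with
  | nil => intro acc p _; simp [pvCollapseLoop, pvAltLoop]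
  | cons c cs ih =>
    intro acc p hlast
    rw [List.map_cons]
    rw [pvAltLoop_sym]
    simp only [pvCollapseLoop, hlast]
    by_cases h : pvSym c = p
    · simp [h, ih acc p hlast]
    · rw [if_pos h, if_pos (fun hp => h (Option.some.inj hp))]
      exact ih (acc ++ [pvSym c]) (pvSym c) (pvGetLast!_concat acc (pvSym c))

-- ===== VERDICT (by name: the statement is the Claim_ definition above) =====
theorem word_short_shape_spec : Claim_equal_word_short_shape := by
  intro word _
  unfold Spec_word_short_shape word_short_shape word_short_shape_alt
  rw [pvWordShapeLoop_eq]
  cases h : word.toList with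
  | nil => rfl
  | cons c cs =>
    simp only [List.nil_append, List.map_cons]
    rw [pvCollapse_eq_alt cs [pvSym c] (pvSym c) (by simp [List.getLast!])]
    conv_rhs => rw [pvAltLoop_sym]
    simp
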